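-- pv_equiv track=rewrite | github.com/Ericsson/codechecker | tools/report-converter/codechecker_report_converter/cli.py | process_metadata
-- ===== SOURCE A (Python) =====
-- supported_metadata_keys = ["analyzer_command", "analyzer_version"]
--
-- def process_metadata(metadata):
--     """ Returns a tuple of valid and invalid metadata values. """
--     if not metadata:
--         return {}, {}
--
--     valid_values = {}
--     invalid_values = {}
--     for m in metadata:
--         key, value = m.split("=", 1)
--         if key in supported_metadata_keys:
--             valid_values[key] = value
--         else:
--             invalid_values[key] = value
--
--     return valid_values, invalid_values
-- ===== SOURCE B (Python) =====
-- supported_metadata_keys = ["analyzer_command", "analyzer_version"]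
--
--
-- def process_metadata(metadata):
--     """ Returns a tuple of valid and invalid metadata values. """
--     combined = {}
--     for m in (metadata or []):
--         key, value = m.split("=", 1)
--         combined[key] = value
--
--     valid_values = {k: v for k, v in combined.items()
--                     if k in supported_metadata_keys}
--     invalid_values = {k: v for k, v in combined.items()
--                       if k not in supported_metadata_keys}
--     return valid_values, invalid_values
-- ===== Notes on version B (the rewrite author's own statement) =====
-- stated objective: alternative
-- what changed: B first builds one combined last-wins dict of all entries and then partitions its items into valid/invalid by two filtering passes over the combined table, instead of A's single loop that branches per entry into two dicts; the empty-guard is dropped.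
import Mathlib
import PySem

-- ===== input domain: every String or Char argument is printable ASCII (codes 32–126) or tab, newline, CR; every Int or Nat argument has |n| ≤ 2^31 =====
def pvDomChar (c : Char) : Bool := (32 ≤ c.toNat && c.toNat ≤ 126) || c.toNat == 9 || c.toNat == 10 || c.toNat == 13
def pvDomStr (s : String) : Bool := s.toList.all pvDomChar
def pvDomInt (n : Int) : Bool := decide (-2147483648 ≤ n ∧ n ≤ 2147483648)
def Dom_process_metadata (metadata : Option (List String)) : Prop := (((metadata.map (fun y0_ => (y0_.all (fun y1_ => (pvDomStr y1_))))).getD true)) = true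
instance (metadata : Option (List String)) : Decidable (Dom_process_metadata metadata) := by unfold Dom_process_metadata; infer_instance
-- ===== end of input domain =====

-- B builds one combined last-wins dict and then partitions its items by two filtering
-- passes, instead of A's one loop branching into two dicts (alternative decomposition,
-- same cost). Pre_ excludes entries without '=', on which both Pythons raise ValueError.


-- ===== PORT A =====
def supported_metadata_keys : List String := ["analyzer_command", "analyzer_version"]

-- key, value = m.split("=", 1)  (exact when '=' occurs in m; Pre_ guarantees that)
def splitKV (m : String) : String × String :=
  match PySem.Str.splitMax? m "=" 1 with
  | some (k :: v :: _) => (k, v)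
  | _ => ("", "")

def process_metadata (metadata : Option (List String)) : (List (String × String)) × (List (String × String)) :=
  match metadata with
  | none => ([], [])
  | some ms =>
    if ms = [] then ([], [])
    else
      let st := ms.foldl
        (fun (st : PySem.Dict String String × PySem.Dict String String) m =>
          let kv := splitKV m
          if supported_metadata_keys.contains kv.1 then
            (st.1.insert kv.1 kv.2, st.2)
          else
            (st.1, st.2.insert kv.1 kv.2))
        (PySem.Dict.empty, PySem.Dict.empty)
      (st.1.items, st.2.items)

-- ===== PORT B =====
def process_metadata_alt (metadata : Option (List String)) : (List (String × String)) × (List (String × String)) :=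
  let combined := (metadata.getD []).foldl
    (fun (d : PySem.Dict String String) m =>
      let kv := splitKV m
      d.insert kv.1 kv.2)
    PySem.Dict.empty
  (combined.items.filter (fun kv => supported_metadata_keys.contains kv.1),
   combined.items.filter (fun kv => !supported_metadata_keys.contains kv.1))

-- ===== PRECONDITION & SPEC =====
-- Pre_ excludes metadata entries not containing '=': there m.split("=",1) yields one
-- piece and both A and B raise ValueError on tuple unpacking.
def Pre_process_metadata (metadata : Option (List String)) : Prop :=
  ∀ m ∈ metadata.getD [], '=' ∈ m.toList
instance (metadata : Option (List String)) : Decidable (Pre_process_metadata metadata) := by unfold Pre_process_metadata; infer_instance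

def pvWitness_process_metadata : Option (List String) :=
  some ["analyzer_command=clang -c", "foo=bar", "analyzer_version=12"]

def Spec_process_metadata (metadata : Option (List String)) (out : (List (String × String)) × (List (String × String))) : Prop := out = process_metadata_alt metadata
instance (metadata : Option (List String)) (out : (List (String × String)) × (List (String × String))) : Decidable (Spec_process_metadata metadata out) := by unfold Spec_process_metadata; infer_instance

-- ===== CLAIM (what is proved, stated in full; the proofs are below) =====
def Claim_equal_process_metadata : Prop := ∀ (metadata : Option (List String)), Dom_process_metadata metadata → Pre_process_metadata metadata → Spec_process_metadata metadata (process_metadata metadata)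

-- ===== LEMMAS AND PROOFS =====

-- Dict.insert written out on the items list
def listInsert (l : List (String × String)) (k v : String) : List (String × String) :=
  if l.any (fun q => q.1 == k) then l.map (fun q => if q.1 == k then (k, v) else q)
  else l ++ [(k, v)]

theorem insert_items (d : PySem.Dict String String) (k v : String) :
    (d.insert k v).items = listInsert d.items k v := by
  simp only [PySem.Dict.insert, PySem.Dict.contains, listInsert]
  split <;> rfl

-- key-only filtering commutes with listInsert
theorem filter_listInsert (l : List (String × String)) (k v : String) (p : String → Bool) :
    (listInsert l k v).filter (fun q => p q.1) =
      if p k then listInsert (l.filter (fun q => p q.1)) k v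
      else l.filter (fun q => p q.1) := by
  unfold listInsert
  by_cases ha : l.any (fun q => q.1 == k)
  · have hmap : (l.map (fun q => if q.1 == k then (k, v) else q)).filter (fun q => p q.1)
        = (l.filter (fun q => p q.1)).map (fun q => if q.1 == k then (k, v) else q) := by
      rw [List.filter_map]
      congr 1
      apply List.filter_congr
      intro q _
      by_cases hq : q.1 = k <;> simp [hq]
    by_cases hp : p k
    · have ha' : (l.filter (fun q => p q.1)).any (fun q => q.1 == k) = true := by
        simp only [List.any_eq_true, List.mem_filter] at ha ⊢
        obtain ⟨q, hq, hqk⟩ := ha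
        exact ⟨q, ⟨hq, by simpa [beq_iff_eq.mp hqk] using hp⟩, hqk⟩
      rw [if_pos ha, if_pos hp, if_pos ha', hmap]
    · have hid : (l.filter (fun q => p q.1)).map (fun q => if q.1 == k then (k, v) else q)
          = l.filter (fun q => p q.1) := by
        rw [show (l.filter (fun q => p q.1)).map (fun q => if q.1 == k then (k, v) else q)
            = (l.filter (fun q => p q.1)).map id from ?_, List.map_id]
        apply List.map_congr_left
        intro q hq
        simp only [List.mem_filter] at hq
        have : ¬ (q.1 = k) := fun h => hp (h ▸ hq.2)
        simp [this]
      rw [if_pos ha, if_neg hp, hmap, hid]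
  · have ha2 : l.any (fun q => q.1 == k) = false := eq_false_of_ne_true ha
    have ha' : (l.filter (fun q => p q.1)).any (fun q => q.1 == k) = false := by
      rw [List.any_eq_false] at ha2 ⊢
      intro q hq
      exact ha2 q (List.mem_of_mem_filter hq)
    rw [if_neg (by simp [ha2]), List.filter_append]
    by_cases hp : p k
    · rw [if_pos hp, if_neg (by simp [ha'])]
      simp [hp]
    · rw [if_neg hp]
      simp [hp]

-- loop invariant: A's two-dict fold equals the key-partition of B's one-dict fold
theorem loop_eq (ms : List String) (d : PySem.Dict String String) :
    ms.foldl
      (fun (st : PySem.Dict String String × PySem.Dict String String) m =>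
        let kv := splitKV m
        if supported_metadata_keys.contains kv.1 then
          (st.1.insert kv.1 kv.2, st.2)
        else
          (st.1, st.2.insert kv.1 kv.2))
      (PySem.Dict.mk (d.items.filter (fun q => supported_metadata_keys.contains q.1)),
       PySem.Dict.mk (d.items.filter (fun q => !supported_metadata_keys.contains q.1)))
    =
    (PySem.Dict.mk (((ms.foldl (fun (e : PySem.Dict String String) m =>
        let kv := splitKV m
        e.insert kv.1 kv.2) d)).items.filter (fun q => supported_metadata_keys.contains q.1)),
     PySem.Dict.mk (((ms.foldl (fun (e : PySem.Dict String String) m =>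
        let kv := splitKV m
        e.insert kv.1 kv.2) d)).items.filter (fun q => !supported_metadata_keys.contains q.1))) := by
  induction ms generalizing d with
  | nil => rfl
  | cons m ms ih =>
    simp only [List.foldl_cons]
    by_cases hc : supported_metadata_keys.contains (splitKV m).1
    · simp only [hc, if_true]
      have h1 : (PySem.Dict.mk (d.items.filter (fun q => supported_metadata_keys.contains q.1))).insert (splitKV m).1 (splitKV m).2
          = PySem.Dict.mk ((d.insert (splitKV m).1 (splitKV m).2).items.filter (fun q => supported_metadata_keys.contains q.1)) := by
        apply PySem.Dict.ext
        rw [insert_items, insert_items]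
        show listInsert (d.items.filter (fun q => supported_metadata_keys.contains q.1)) (splitKV m).1 (splitKV m).2
            = (listInsert d.items (splitKV m).1 (splitKV m).2).filter (fun q => supported_metadata_keys.contains q.1)
        rw [filter_listInsert d.items (splitKV m).1 (splitKV m).2 (fun s => supported_metadata_keys.contains s)]
        simp
        intro hmem
        simp_all
      have h2 : (PySem.Dict.mk (d.items.filter (fun q => !supported_metadata_keys.contains q.1)))
          = PySem.Dict.mk ((d.insert (splitKV m).1 (splitKV m).2).items.filter (fun q => !supported_metadata_keys.contains q.1)) := by
        apply PySem.Dict.ext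
        rw [insert_items]
        show d.items.filter (fun q => !supported_metadata_keys.contains q.1)
            = (listInsert d.items (splitKV m).1 (splitKV m).2).filter (fun q => !supported_metadata_keys.contains q.1)
        rw [filter_listInsert d.items (splitKV m).1 (splitKV m).2 (fun s => !supported_metadata_keys.contains s)]
        simp
        intro hmem
        simp_all
      rw [h1, h2]
      exact ih _
    · simp only [hc]
      have h1 : (PySem.Dict.mk (d.items.filter (fun q => supported_metadata_keys.contains q.1)))
          = PySem.Dict.mk ((d.insert (splitKV m).1 (splitKV m).2).items.filter (fun q => supported_metadata_keys.contains q.1)) := by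
        apply PySem.Dict.ext
        rw [insert_items]
        show d.items.filter (fun q => supported_metadata_keys.contains q.1)
            = (listInsert d.items (splitKV m).1 (splitKV m).2).filter (fun q => supported_metadata_keys.contains q.1)
        rw [filter_listInsert d.items (splitKV m).1 (splitKV m).2 (fun s => supported_metadata_keys.contains s)]
        simp
        intro hmem
        simp_all
      have h2 : (PySem.Dict.mk (d.items.filter (fun q => !supported_metadata_keys.contains q.1))).insert (splitKV m).1 (splitKV m).2
          = PySem.Dict.mk ((d.insert (splitKV m).1 (splitKV m).2).items.filter (fun q => !supported_metadata_keys.contains q.1)) := by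
        apply PySem.Dict.ext
        rw [insert_items, insert_items]
        show listInsert (d.items.filter (fun q => !supported_metadata_keys.contains q.1)) (splitKV m).1 (splitKV m).2
            = (listInsert d.items (splitKV m).1 (splitKV m).2).filter (fun q => !supported_metadata_keys.contains q.1)
        rw [filter_listInsert d.items (splitKV m).1 (splitKV m).2 (fun s => !supported_metadata_keys.contains s)]
        simp
        intro hmem
        simp_all
      rw [h1, h2]
      exact ih _

-- ===== VERDICT (by name: the statement is the Claim_ definition above) =====
theorem process_metadata_spec : Claim_equal_process_metadata := by
  intro metadata _ _
  unfold Spec_process_metadata process_metadata process_metadata_alt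
  match metadata with
  | none => rfl
  | some ms =>
    simp only [Option.getD]
    by_cases h : ms = []
    · subst h; rfl
    · simp only [if_neg h]
      have h2 := loop_eq ms (PySem.Dict.mk [])
      simp only [List.filter_nil] at h2
      have he : (PySem.Dict.empty : PySem.Dict String String) = PySem.Dict.mk [] := rfl
      rw [he, h2]
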